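-- pv_equiv track=rewrite | github.com/dixitdevarshi/RoboJEC | robojec/core/question_generator.py | _filter_similar
-- ===== SOURCE A (Python) =====
-- from typing import Dict, List
--
-- def _filter_similar(candidates: List[str], existing: List[str]) -> List[str]:
--     _STOP = {"about", "would", "could", "think", "there", "their", "where",
--              "when", "what", "that", "have", "your", "with", "this"}
--     filtered = []
--     for candidate in candidates:
--         cw = [w for w in candidate.lower().split() if len(w) > 4 and w not in _STOP]
--         similar = False
--         for exist in existing:
--             ew = [w for w in exist.lower().split() if len(w) > 4 and w not in _STOP]
--             if sum(1 for w in cw if w in ew) >= 3: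
--                 similar = True
--                 break
--         if not similar:
--             filtered.append(candidate)
--     return filtered
-- ===== SOURCE B (Python) =====
-- def _filter_similar(candidates, existing):
--     _STOP = {"about", "would", "could", "think", "there", "their", "where",
--              "when", "what", "that", "have", "your", "with", "this"}
--
--     def sig(text):
--         return [w for w in text.lower().split() if len(w) > 4 and w not in _STOP]
--
--     # inverted index: significant word -> list of indices of existing strings containing it
--     index = {}
--     for i, exist in enumerate(existing):
--         for w in dict.fromkeys(sig(exist)):
--             index.setdefault(w, []).append(i)
--
--     filtered = []
--     for candidate in candidates:
--         counts = {}
--         similar = False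
--         for w in sig(candidate):
--             for i in index.get(w, ()):
--                 c = counts.get(i, 0) + 1
--                 counts[i] = c
--                 if c >= 3:
--                     similar = True
--                     break
--             if similar:
--                 break
--         if not similar:
--             filtered.append(candidate)
--     return filtered
-- ===== Notes on version B (the rewrite author's own statement) =====
-- stated objective: faster
-- what changed: B builds an inverted index (significant word -> indices of existing strings) once and, per candidate, walks its word list bumping per-existing counters with an early stop at 3, instead of A recomputing every existing string's significant-word list for every candidate and counting pairwise.
import Mathlib
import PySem

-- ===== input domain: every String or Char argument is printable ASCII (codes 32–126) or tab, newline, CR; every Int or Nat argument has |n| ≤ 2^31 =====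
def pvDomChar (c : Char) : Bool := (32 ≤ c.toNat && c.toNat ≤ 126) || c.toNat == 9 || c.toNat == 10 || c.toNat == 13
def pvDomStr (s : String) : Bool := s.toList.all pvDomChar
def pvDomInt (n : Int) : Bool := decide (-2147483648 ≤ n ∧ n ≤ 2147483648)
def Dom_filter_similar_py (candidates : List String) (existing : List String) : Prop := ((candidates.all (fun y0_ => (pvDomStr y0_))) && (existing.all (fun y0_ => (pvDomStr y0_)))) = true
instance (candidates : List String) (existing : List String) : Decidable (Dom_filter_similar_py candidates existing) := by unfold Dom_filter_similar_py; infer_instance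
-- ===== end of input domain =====

-- B replaces A's candidate×existing rescans by an inverted index (significant word → indices of
-- existing strings) built once, with per-candidate counters that stop at the threshold 3.

-- the stop-word set literal (shared verbatim by both Python versions)
def pvStop : PySem.Set String :=
  PySem.Set.ofList ["about", "would", "could", "think", "there", "their", "where",
                    "when", "what", "that", "have", "your", "with", "this"]

-- [w for w in text.lower().split() if len(w) > 4 and w not in _STOP]  (identical line in A and B)
def sigWords (text : String) : List String :=
  (PySem.Str.split₀ (PySem.Str.lower text)).filter
    (fun w => decide (4 < PySem.Str.len w) && !(PySem.Set.contains pvStop w))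

-- ===== PORT A =====
-- inner loop over `existing` with the break: sum(1 for w in cw if w in ew) >= 3
def aSimilar (cw : List String) : List String → Bool
  | [] => false
  | e :: rest =>
    let ew := sigWords e
    if 3 ≤ cw.foldl (fun acc w => if ew.contains w then acc + 1 else acc) (0 : Int) then true
    else aSimilar cw rest

-- outer loop appending non-similar candidates
def aGo (existing : List String) : List String → List String
  | [] => []
  | c :: cs =>
    let cw := sigWords c
    if aSimilar cw existing then aGo existing cs else c :: aGo existing cs

def filter_similar_py (candidates : List String) (existing : List String) : List String :=
  aGo existing candidates

-- ===== PORT B =====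
-- for w in dict.fromkeys(sig(exist)): index.setdefault(w, []).append(i)
def bAddExist (d : PySem.Dict String (List Int)) (i : Int) (ws : List String) :
    PySem.Dict String (List Int) :=
  ws.foldl (fun d w => d.modify w [] (fun l => l ++ [i])) d

-- for i, exist in enumerate(existing): ...
def bBuild (existing : List String) : PySem.Dict String (List Int) :=
  (PySem.List.enumerate existing).foldl
    (fun d p => bAddExist d p.1 (PySem.List.dedup (sigWords p.2))) PySem.Dict.empty

-- for i in index.get(w, ()): bump the counter, break at 3
def bHit (counts : PySem.Dict Int Int) : List Int → PySem.Dict Int Int × Bool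
  | [] => (counts, false)
  | i :: is =>
    let c := counts.getD i 0 + 1
    let counts' := counts.insert i c
    if 3 ≤ c then (counts', true) else bHit counts' is

-- for w in sig(candidate): ... with the outer break
def bScan (index : PySem.Dict String (List Int)) (counts : PySem.Dict Int Int) :
    List String → Bool
  | [] => false
  | w :: ws =>
    let r := bHit counts (index.getD w [])
    if r.2 then true else bScan index r.1 ws

-- outer loop appending non-similar candidates
def bGo (index : PySem.Dict String (List Int)) : List String → List String
  | [] => []
  | c :: cs =>
    if bScan index PySem.Dict.empty (sigWords c) then bGo index cs else c :: bGo index cs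

def filter_similar_py_alt (candidates : List String) (existing : List String) : List String :=
  let index := bBuild existing
  bGo index candidates

-- ===== PRECONDITION & SPEC =====
def Spec_filter_similar_py (candidates : List String) (existing : List String) (out : List String) : Prop := out = filter_similar_py_alt candidates existing
instance (candidates : List String) (existing : List String) (out : List String) : Decidable (Spec_filter_similar_py candidates existing out) := by unfold Spec_filter_similar_py; infer_instance

-- ===== CLAIM (what is proved, stated in full; the proofs are below) =====
def Claim_equal_filter_similar_py : Prop := ∀ (candidates : List String) (existing : List String), Dom_filter_similar_py candidates existing → Spec_filter_similar_py candidates existing (filter_similar_py candidates existing)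

-- ===== LEMMAS AND PROOFS =====

-- A's inner loop decides: some existing string shares ≥ 3 significant words (with multiplicity in cw)
theorem aSimilar_iff (cw existing : List String) :
    aSimilar cw existing = true ↔
      ∃ k : Nat, ∃ h : k < existing.length,
        3 ≤ (cw.countP (fun w => (sigWords existing[k]).contains w) : Int) := by
  induction existing with
  | nil => simp [aSimilar]
  | cons e rest ih =>
    simp only [aSimilar, PySem.List.foldl_if_add_one, zero_add]
    by_cases h : 3 ≤ (cw.countP (fun w => (sigWords e).contains w) : Int)
    · rw [if_pos h]
      simp only [true_iff]
      exact ⟨0, by simp, by simpa using h⟩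
    · rw [if_neg h, ih]
      constructor
      · rintro ⟨k, hk, h3⟩
        exact ⟨k + 1, by simpa using hk, by simpa using h3⟩
      · rintro ⟨k, hk, h3⟩
        cases k with
        | zero => exact absurd (by simpa using h3) h
        | succ k => exact ⟨k, by simpa using hk, by simpa using h3⟩

-- index lists: getD after one exist's insertion (ws nodup)
theorem bAddExist_getD (d : PySem.Dict String (List Int)) (i : Int) (ws : List String)
    (hnd : ws.Nodup) (w : String) :
    (bAddExist d i ws).getD w [] = d.getD w [] ++ (if w ∈ ws then [i] else []) := by
  induction ws generalizing d with
  | nil => simp [bAddExist]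
  | cons w' ws ih =>
    simp only [bAddExist, List.foldl_cons] at *
    rcases List.nodup_cons.mp hnd with ⟨hw', hnd'⟩
    by_cases hew : w = w'
    · subst hew
      rw [ih _ hnd', PySem.Dict.getD_modify_self, if_neg hw', if_pos (List.mem_cons_self)]
      simp
    · rw [ih _ hnd']
      rw [PySem.Dict.getD_modify_of_ne d ([]) (fun l => l ++ [i]) hew]
      simp [List.mem_cons, hew]

-- the specification list of the inverted index for a word
def idxSpec (existing : List String) (w : String) : List Int :=
  ((PySem.List.enumerate existing).filter
    (fun p => (PySem.List.dedup (sigWords p.2)).contains w)).map (·.1)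

-- the index-building fold, generalized over the starting dictionary
theorem bBuild_fold (w : String) :
    ∀ (l : List (Int × String)) (d : PySem.Dict String (List Int)),
      (l.foldl (fun d p => bAddExist d p.1 (PySem.List.dedup (sigWords p.2))) d).getD w []
        = d.getD w [] ++
          (l.filter (fun p => (PySem.List.dedup (sigWords p.2)).contains w)).map (·.1)
  | [], d => by simp
  | p :: l, d => by
    rw [List.foldl_cons, bBuild_fold w l,
        bAddExist_getD _ _ _ (PySem.List.nodup_dedup _) w]
    by_cases hm : w ∈ sigWords p.2 <;> simp [hm]

theorem bBuild_getD (existing : List String) (w : String) :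
    (bBuild existing).getD w [] = idxSpec existing w := by
  unfold bBuild idxSpec
  rw [bBuild_fold w]
  simp

theorem mem_idxSpec (existing : List String) (w : String) (j : Int) :
    j ∈ idxSpec existing w ↔
      ∃ k : Nat, ∃ h : k < existing.length, j = (k : Int) ∧ w ∈ sigWords existing[k] := by
  unfold idxSpec
  simp only [List.mem_map, List.mem_filter, PySem.List.mem_enumerate_iff]
  constructor
  · rintro ⟨p, ⟨⟨k, hk, rfl⟩, hc⟩, rfl⟩
    exact ⟨k, hk, by simp, by simpa using hc⟩
  · rintro ⟨k, hk, rfl, hw⟩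
    exact ⟨((k : Int), existing[k]), ⟨⟨k, hk, by simp⟩, by simpa using hw⟩, rfl⟩

theorem idxSpec_nodup (existing : List String) (w : String) : (idxSpec existing w).Nodup := by
  unfold idxSpec
  have hp : (((PySem.List.enumerate existing).filter
      (fun p => (PySem.List.dedup (sigWords p.2)).contains w)).map (·.1)).Pairwise (· < ·) := by
    rw [List.pairwise_map]
    exact (PySem.List.pairwise_lt_enumerate existing 0).filter _
  exact hp.imp ne_of_lt

-- bHit when some counter is already at 2 (list nodup): reports similar
theorem bHit_true (counts : PySem.Dict Int Int) (is : List Int) (hnd : is.Nodup)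
    (hex : ∃ i ∈ is, 2 ≤ counts.getD i 0) : (bHit counts is).2 = true := by
  induction is generalizing counts with
  | nil => simp at hex
  | cons i is ih =>
    rcases List.nodup_cons.mp hnd with ⟨hi, hnd'⟩
    by_cases h3 : 3 ≤ counts.getD i 0 + 1
    · simp [bHit, h3]
    · rcases hex with ⟨i0, hm, h2⟩
      rcases List.mem_cons.mp hm with rfl | hm'
      · omega
      · have hne : i0 ≠ i := by intro h; subst h; exact hi hm'
        simp only [bHit, if_neg h3]
        exact ih _ hnd' ⟨i0, hm', by rwa [PySem.Dict.getD_insert, if_neg hne]⟩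

-- bHit when no counter reaches 3: counters all bumped by membership
theorem bHit_false (counts : PySem.Dict Int Int) (is : List Int) (hnd : is.Nodup)
    (hlt : ∀ i ∈ is, counts.getD i 0 < 2) :
    (bHit counts is).2 = false ∧
      ∀ j, (bHit counts is).1.getD j 0 = counts.getD j 0 + (if j ∈ is then 1 else 0) := by
  induction is generalizing counts with
  | nil => simp [bHit]
  | cons i is ih =>
    rcases List.nodup_cons.mp hnd with ⟨hi, hnd'⟩
    have h2 : counts.getD i 0 < 2 := hlt i List.mem_cons_self
    have h3 : ¬ 3 ≤ counts.getD i 0 + 1 := by omega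
    simp only [bHit, if_neg h3]
    have hlt' : ∀ i' ∈ is, (counts.insert i (counts.getD i 0 + 1)).getD i' 0 < 2 := by
      intro i' hm
      have hne : i' ≠ i := by intro h; subst h; exact hi hm
      rw [PySem.Dict.getD_insert, if_neg hne]
      exact hlt i' (List.mem_cons_of_mem _ hm)
    rcases ih _ hnd' hlt' with ⟨hb, hg⟩
    refine ⟨hb, fun j => ?_⟩
    rw [hg j, PySem.Dict.getD_insert]
    by_cases hji : j = i
    · subst hji
      simp [hi]
    · simp [List.mem_cons, hji]

-- bScan decides: some existing index accumulates ≥ 3 hits over the whole candidate word list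
theorem bScan_iff (index : PySem.Dict String (List Int))
    (hnd : ∀ w, (index.getD w []).Nodup) :
    ∀ (ws : List String) (counts : PySem.Dict Int Int), (∀ j, counts.getD j 0 < 3) →
      (bScan index counts ws = true ↔
        ∃ j : Int, 3 ≤ counts.getD j 0 + (ws.countP (fun w => (index.getD w []).contains j) : Int)) := by
  intro ws
  induction ws with
  | nil =>
    intro counts h
    simp only [bScan, List.countP_nil, Nat.cast_zero, add_zero, Bool.false_eq_true, false_iff]
    rintro ⟨j, hj⟩
    have := h j
    omega
  | cons w ws ih =>
    intro counts h
    simp only [bScan]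
    by_cases hex : ∃ i ∈ index.getD w [], 2 ≤ counts.getD i 0
    · rw [bHit_true counts _ (hnd w) hex]
      simp only [if_true, true_iff]
      rcases hex with ⟨i, hm, h2⟩
      refine ⟨i, ?_⟩
      have hc : ((index.getD w []).contains i) = true := by simpa using hm
      rw [List.countP_cons, hc]
      simp only [if_true]
      push_cast
      omega
    · push Not at hex
      have hex' : ∀ i ∈ index.getD w [], counts.getD i 0 < 2 := fun i hm => hex i hm
      rcases bHit_false counts _ (hnd w) hex' with ⟨hb, hg⟩
      rw [hb]
      simp only [Bool.false_eq_true, if_false]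
      have h' : ∀ j, (bHit counts (index.getD w [])).1.getD j 0 < 3 := by
        intro j
        rw [hg j]
        by_cases hm : j ∈ index.getD w []
        · have := hex' j hm; simp [hm]; omega
        · have := h j; simp [hm]; omega
      rw [ih _ h']
      apply exists_congr
      intro j
      rw [hg j, List.countP_cons]
      by_cases hm : j ∈ index.getD w []
      · have hc : ((index.getD w []).contains j) = true := by simpa using hm
        rw [hc]
        simp only [if_pos hm, if_true]
        push_cast
        constructor <;> (intro; omega)
      · have hc : ((index.getD w []).contains j) = false := by simpa using hm
        rw [hc]
        simp only [if_neg hm]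
        push_cast
        constructor <;> (intro; omega)

-- per candidate, the two similarity tests agree
theorem similar_agree (cw existing : List String) :
    bScan (bBuild existing) PySem.Dict.empty cw = aSimilar cw existing := by
  have hnd : ∀ w, ((bBuild existing).getD w []).Nodup := by
    intro w; rw [bBuild_getD]; exact idxSpec_nodup _ _
  have h0 : ∀ j : Int, (PySem.Dict.empty : PySem.Dict Int Int).getD j 0 < 3 := by
    intro j; simp [pysem]
  have key : ∀ (k : Nat) (hk : k < existing.length) (w : String),
      (((bBuild existing).getD w []).contains ((k : Int))) = ((sigWords existing[k]).contains w) := by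
    intro k hk w
    rw [Bool.eq_iff_iff]
    simp only [List.contains_iff_mem, bBuild_getD, mem_idxSpec]
    constructor
    · rintro ⟨k', hk', hkk, hw⟩
      have : k' = k := by exact_mod_cast hkk.symm
      subst this
      exact hw
    · intro hw
      exact ⟨k, hk, rfl, hw⟩
  rw [Bool.eq_iff_iff, bScan_iff (bBuild existing) hnd cw PySem.Dict.empty h0, aSimilar_iff]
  constructor
  · rintro ⟨j, hj⟩
    rw [show (PySem.Dict.empty : PySem.Dict Int Int).getD j 0 = 0 by simp [pysem], zero_add] at hj
    by_cases hrange : 0 ≤ j ∧ j < existing.length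
    · refine ⟨j.toNat, by omega, ?_⟩
      have hjk : ((j.toNat : Nat) : Int) = j := by omega
      have hcp : cw.countP (fun w => ((bBuild existing).getD w []).contains j)
          = cw.countP (fun w => (sigWords (existing[j.toNat]'(by omega))).contains w) := by
        apply List.countP_congr
        intro w _
        have hkey := key j.toNat (by omega) w
        rw [hjk] at hkey
        rw [hkey]
      rw [hcp] at hj
      exact hj
    · exfalso
      have hz : cw.countP (fun w => ((bBuild existing).getD w []).contains j) = 0 := by
        rw [List.countP_eq_zero]
        intro w _
        simp only [List.contains_iff_mem, bBuild_getD, mem_idxSpec]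
        rintro ⟨k, hk, rfl, -⟩
        exact hrange ⟨by positivity, by exact_mod_cast hk⟩
      rw [hz] at hj
      norm_num at hj
  · rintro ⟨k, hk, h3⟩
    refine ⟨(k : Int), ?_⟩
    rw [show (PySem.Dict.empty : PySem.Dict Int Int).getD (k : Int) 0 = 0 by simp [pysem], zero_add]
    have hcp : cw.countP (fun w => ((bBuild existing).getD w []).contains (k : Int))
        = cw.countP (fun w => (sigWords existing[k]).contains w) := by
      apply List.countP_congr
      intro w _
      rw [key k hk w]
    rw [hcp]
    exact h3

theorem go_agree (existing : List String) : ∀ cs, aGo existing cs = bGo (bBuild existing) cs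
  | [] => rfl
  | c :: cs => by
    simp only [aGo, bGo, similar_agree]
    rw [go_agree existing cs]

-- ===== VERDICT (by name: the statement is the Claim_ definition above) =====
theorem filter_similar_py_spec : Claim_equal_filter_similar_py := by
  intro candidates existing _
  unfold Spec_filter_similar_py filter_similar_py filter_similar_py_alt
  exact go_agree existing candidates
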